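-- pv_equiv track=rewrite | github.com/Minerstove/Python | cs11/Prac9/Prac9j.py | sorted_streaks
-- ===== SOURCE A (Python) =====
-- def sorted_streaks(ints):
--     if not ints:
--         return []
--     result = []
--     start = ints[0]
--
--     window = [start,]
--     for i in range(1, len(ints)):
--         if start > ints[i]:
--             result.append(tuple(window))
--             window = [ints[i],]
--             start = ints[i]
--         else:
--             window.append(ints[i])
--             start = ints[i]
--
--     result.append(tuple(window))
--     return result
-- ===== SOURCE B (Python) =====
-- def sorted_streaks(ints):
--     if not ints:
--         return []
--     n = len(ints)
--     cuts = [0] + [i for i, (a, b) in enumerate(zip(ints, ints[1:]), 1) if b < a] + [n]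
--     return [tuple(ints[lo:hi]) for lo, hi in zip(cuts, cuts[1:])]
-- ===== Notes on version B (the rewrite author's own statement) =====
-- stated objective: alternative
-- what changed: A accumulates a growing window while scanning and flushes it at each descent; B first computes the list of cut indices (descent positions plus the two ends) and then emits each streak as a slice between consecutive cuts.
import Mathlib
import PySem

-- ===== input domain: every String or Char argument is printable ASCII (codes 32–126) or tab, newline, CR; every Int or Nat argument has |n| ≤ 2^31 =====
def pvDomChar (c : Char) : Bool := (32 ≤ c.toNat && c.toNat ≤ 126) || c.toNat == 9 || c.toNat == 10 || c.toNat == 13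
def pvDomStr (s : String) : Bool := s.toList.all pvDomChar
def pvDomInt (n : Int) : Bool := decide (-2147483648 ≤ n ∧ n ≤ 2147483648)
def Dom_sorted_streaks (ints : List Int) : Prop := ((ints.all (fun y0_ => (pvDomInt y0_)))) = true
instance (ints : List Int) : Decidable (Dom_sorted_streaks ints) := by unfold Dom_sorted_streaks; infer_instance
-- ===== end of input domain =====

-- B replaces A's incremental window accumulation with a locate-cut-indices-then-slice
-- decomposition (alternative, same linear cost).

-- ===== PORT A =====
-- loop body of A's for-loop over i in range(1, len(ints)); state = (result, window, start)
def sortedStreaksStep (s : List (List Int) × List Int × Int) (v : Int) :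
    List (List Int) × List Int × Int :=
  if s.2.2 > v then (s.1 ++ [s.2.1], [v], v) else (s.1, s.2.1 ++ [v], v)

def sorted_streaks (ints : List Int) : List (List Int) :=
  match ints with
  | [] => []
  | x :: _ =>
    let st := (PySem.List.pyRange 1 (ints.length : Int)).foldl
      (fun s i => sortedStreaksStep s (PySem.List.pyGetD ints i 0)) ([], [x], x)
    st.1 ++ [st.2.1]

-- ===== PORT B =====
def sorted_streaks_alt (ints : List Int) : List (List Int) :=
  match ints with
  | [] => []
  | _ :: _ =>
    let n : Int := ints.length
    let cuts : List Int :=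
      [0] ++ ((PySem.List.enumerate (ints.zip (PySem.List.slice ints (some 1) none)) 1).filterMap
        (fun p => if p.2.2 < p.2.1 then some p.1 else none)) ++ [n]
    (cuts.zip (PySem.List.slice cuts (some 1) none)).map
      (fun p => PySem.List.slice ints (some p.1) (some p.2))

-- ===== PRECONDITION & SPEC =====
def Spec_sorted_streaks (ints : List Int) (out : List (List Int)) : Prop := out = sorted_streaks_alt ints
instance (ints : List Int) (out : List (List Int)) : Decidable (Spec_sorted_streaks ints out) := by unfold Spec_sorted_streaks; infer_instance

-- ===== CLAIM (what is proved, stated in full; the proofs are below) =====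
def Claim_equal_sorted_streaks : Prop := ∀ (ints : List Int), Dom_sorted_streaks ints → Spec_sorted_streaks ints (sorted_streaks ints)

-- ===== LEMMAS AND PROOFS =====

-- canonical recursion both ports are reduced to
def streaksGo (w : List Int) (p : Int) : List Int → List (List Int)
  | [] => [w]
  | v :: rest => if p > v then w :: streaksGo [v] v rest else streaksGo (w ++ [v]) v rest

-- indices (from i) at which a descent happens, p = previous element
def descN (i : Nat) (p : Int) : List Int → List Nat
  | [] => []
  | v :: rest => if v < p then i :: descN (i+1) v rest else descN (i+1) v rest

-- slices of L between consecutive boundaries lo :: his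
def sliceSegs (L : List Int) (lo : Nat) : List Nat → List (List Int)
  | [] => []
  | hi :: rest => (L.drop lo).take (hi - lo) :: sliceSegs L hi rest

theorem A_fold (ys : List Int) : ∀ (res : List (List Int)) (w : List Int) (p : Int),
    (ys.foldl sortedStreaksStep (res, w, p)).1 ++ [(ys.foldl sortedStreaksStep (res, w, p)).2.1]
      = res ++ streaksGo w p ys := by
  induction ys with
  | nil => intro res w p; simp [streaksGo]
  | cons v rest ih =>
      intro res w p
      by_cases h : p > v
      · simp [streaksGo, sortedStreaksStep, h, ih]
      · simp [streaksGo, sortedStreaksStep, h, ih]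

theorem A_eq_streaksGo (x : Int) (xs : List Int) :
    sorted_streaks (x :: xs) = streaksGo [x] x xs := by
  show ((PySem.List.pyRange 1 ((x :: xs).length : Int)).foldl
      (fun s i => sortedStreaksStep s (PySem.List.pyGetD (x :: xs) i 0)) ([], [x], x)).1
      ++ [((PySem.List.pyRange 1 ((x :: xs).length : Int)).foldl
      (fun s i => sortedStreaksStep s (PySem.List.pyGetD (x :: xs) i 0)) ([], [x], x)).2.1]
      = streaksGo [x] x xs
  rw [PySem.List.foldl_pyRange_pyGetD' (x :: xs) 0 sortedStreaksStep ([], [x], x) (by norm_num)]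
  simpa using A_fold xs [] [x] x

theorem B_desc (ys : List Int) : ∀ (a : Int) (i : Nat),
    (PySem.List.enumerate ((a :: ys).zip ys) (i : Int)).filterMap
        (fun p => if p.2.2 < p.2.1 then some p.1 else none)
      = (descN i a ys).map (fun k => (k : Int)) := by
  induction ys with
  | nil => intro a i; simp [descN]
  | cons v rest ih =>
      intro a i
      have h1 : ((i : Int) + 1) = ((i + 1 : Nat) : Int) := by push_cast; ring
      rw [List.zip_cons_cons, PySem.List.enumerate_cons]
      simp only [List.filterMap_cons]
      by_cases h : v < a
      · simp only [h, if_true, descN]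
        rw [h1, ih v (i+1)]
        rfl
      · simp only [h, if_false, descN]
        rw [h1, ih v (i+1)]

theorem B_segs (L : List Int) (rs : List Nat) : ∀ (c : Nat),
    ((((c : Int) :: rs.map (fun k => (k : Int))).zip (rs.map (fun k => (k : Int)))).map
        (fun p => PySem.List.slice L (some p.1) (some p.2)))
      = sliceSegs L c rs := by
  induction rs with
  | nil => intro c; simp [sliceSegs]
  | cons r rest ih =>
      intro c
      show ((((c : Int) :: ((r : Int) :: rest.map (fun k => (k : Int)))).zip
          ((r : Int) :: rest.map (fun k => (k : Int)))).map
          (fun p => PySem.List.slice L (some p.1) (some p.2))) = sliceSegs L c (r :: rest)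
      rw [List.zip_cons_cons, List.map_cons, ih r, PySem.List.slice_natCast]
      rfl

theorem main_lemma (L : List Int) (ys : List Int) : ∀ (i lo : Nat) (p : Int) (w : List Int),
    ys = L.drop i → lo ≤ i → w = (L.drop lo).take (i - lo) →
    streaksGo w p ys = sliceSegs L lo (descN i p ys ++ [L.length]) := by
  induction ys with
  | nil =>
      intro i lo p w hdrop hle hw
      have hlen : L.length ≤ i := by
        have := congrArg List.length hdrop
        simp at this; omega
      have h1 : (L.drop lo).take (i - lo) = L.drop lo :=
        List.take_of_length_le (by simp; omega)
      have h2 : (L.drop lo).take (L.length - lo) = L.drop lo :=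
        List.take_of_length_le (by simp)
      simp [streaksGo, descN, sliceSegs, hw, h1, h2]
  | cons v rest ih =>
      intro i lo p w hdrop hle hw
      have hi : i < L.length := by
        by_contra h
        rw [List.drop_of_length_le (by omega)] at hdrop
        simp at hdrop
      have hrest : rest = L.drop (i + 1) := by
        have : L.drop (i+1) = (L.drop i).drop 1 := by
          rw [List.drop_drop]
        rw [this, ← hdrop]; simp
      have hgetv : L[i]? = some v := by
        have h0 : (L.drop i)[0]? = some v := by rw [← hdrop]; rfl
        rwa [List.getElem?_drop, Nat.add_zero] at h0
      have htake : ∀ lo' : Nat, lo' ≤ i →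
          (L.drop lo').take (i + 1 - lo') = (L.drop lo').take (i - lo') ++ [v] := by
        intro lo' hlo'
        have hidx : (i + 1 - lo') = (i - lo') + 1 := by omega
        rw [hidx, List.take_add_one]
        congr 1
        rw [List.getElem?_drop]
        have : lo' + (i - lo') = i := by omega
        rw [this, hgetv]
        rfl
      by_cases h : p > v
      · have hmem : v < p := h
        simp only [streaksGo, descN, if_pos h, List.cons_append, sliceSegs]
        rw [← hw]
        congr 1
        exact ih (i+1) i v [v] hrest (by omega) (by
          rw [← hdrop]; simp)
      · have hmem : ¬ v < p := h
        simp only [streaksGo, descN, if_neg h]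
        exact ih (i+1) lo v (w ++ [v]) hrest (by omega) (by
          rw [hw, htake lo hle])

theorem B_eq_streaksGo (x : Int) (xs : List Int) :
    sorted_streaks_alt (x :: xs) = streaksGo [x] x xs := by
  show (let n : Int := ((x :: xs).length : Int)
    let cuts : List Int :=
      [0] ++ ((PySem.List.enumerate ((x :: xs).zip (PySem.List.slice (x :: xs) (some 1) none)) 1).filterMap
        (fun p => if p.2.2 < p.2.1 then some p.1 else none)) ++ [n]
    (cuts.zip (PySem.List.slice cuts (some 1) none)).map
      (fun p => PySem.List.slice (x :: xs) (some p.1) (some p.2))) = streaksGo [x] x xs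
  simp only [PySem.List.slice_from_one, List.tail_cons]
  have hdesc := B_desc xs x 1
  simp only [Nat.cast_one] at hdesc
  rw [hdesc]
  have hcuts : ([ (0 : Int) ] ++ (descN 1 x xs).map (fun k => (k : Int)) ++ [((x :: xs).length : Int)])
      = ((0 : Nat) : Int) :: (descN 1 x xs ++ [(x :: xs).length]).map (fun k => (k : Int)) := by
    simp
  rw [hcuts]
  have htail : (((0 : Nat) : Int) :: (descN 1 x xs ++ [(x :: xs).length]).map (fun k => (k : Int))).tail
      = (descN 1 x xs ++ [(x :: xs).length]).map (fun k => (k : Int)) := rfl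
  rw [htail, B_segs (x :: xs) (descN 1 x xs ++ [(x :: xs).length]) 0]
  exact (main_lemma (x :: xs) xs 1 0 x [x] (by simp) (by omega) (by simp)).symm

-- ===== VERDICT (by name: the statement is the Claim_ definition above) =====
theorem sorted_streaks_spec : Claim_equal_sorted_streaks := by
  intro ints _
  unfold Spec_sorted_streaks
  match ints with
  | [] => rfl
  | x :: xs => rw [A_eq_streaksGo, B_eq_streaksGo]
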